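-- pv_equiv track=rewrite | github.com/neilharvey/AdventOfCode | 2020/Day17/day17.py | simulate_cycles
-- ===== SOURCE A (Python) =====
-- def get_neighbours(cube:tuple) -> list:
--
--     dimensions = len(cube)
--     if dimensions == 3:
--         local_area = [(dx,dy,dz) for dx in range(-1,2) for dy in range (-1,2) for dz in range(-1,2) if (dx != 0 or dy != 0 or dz != 0)]
--         neighbours = [(cube[0] + dx, cube[1] + dy, cube[2] + dz) for (dx,dy,dz) in local_area]
--     else:
--         local_area = [(dx,dy,dz,dw) for dx in range(-1,2) for dy in range (-1,2) for dz in range(-1,2) for dw in range(-1,2) if (dx != 0 or dy != 0 or dz != 0 or dw != 0)]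
--         neighbours = [(cube[0] + dx, cube[1] + dy, cube[2] + dz, cube[3] + dw) for (dx,dy,dz,dw) in local_area]
--
--     return neighbours
--
-- def get_active_neighbours(active_cubes, cube):
--
--      neighbours = get_neighbours(cube)
--      return [n for n in neighbours if n in active_cubes]
--
-- def simulate_cycles(active_cubes:set, cycles:int) -> set:
--
--     for _ in range(1, cycles + 1):
--
--         deactivated_cubes = set()
--         for cube in active_cubes:
--             active_neighbours = len(get_active_neighbours(active_cubes, cube))
--             if not (active_neighbours == 2 or active_neighbours == 3):
--                 deactivated_cubes.add(cube)
--
--         activated_cubes = set()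
--         all_neighbours = set([neighbour for cube in active_cubes for neighbour in get_neighbours(cube)])
--         for cube in all_neighbours:
--             active_neighbours = len(get_active_neighbours(active_cubes, cube))
--             if active_neighbours == 3:
--                 activated_cubes.add(cube)
--
--         active_cubes = active_cubes.difference(deactivated_cubes).union(activated_cubes)
--
--     return active_cubes
-- ===== SOURCE B (Python) =====
-- def _neighbours(cube):
--     if len(cube) not in (3, 4):
--         return []  # cells of any other arity have no neighbourhood
--     offsets = [[]]
--     for _ in cube:
--         offsets = [o + [d] for o in offsets for d in (-1, 0, 1)]
--     return [tuple(c + d for c, d in zip(cube, o)) for o in offsets if any(o)]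
--
--
-- def simulate_cycles(active_cubes: set, cycles: int) -> set:
--     for _ in range(cycles):
--         # one pass: count each active cube's contribution to its neighbours
--         counts = {}
--         for cube in active_cubes:
--             for n in _neighbours(cube):
--                 counts[n] = counts.get(n, 0) + 1
--         survivors = {c for c in active_cubes if counts.get(c, 0) in (2, 3)}
--         births = {c for c in counts if counts[c] == 3 and c not in active_cubes}
--         active_cubes = survivors | births
--     return active_cubes
-- ===== Notes on version B (the rewrite author's own statement) =====
-- stated objective: faster
-- what changed: Instead of rescanning all 26/80 neighbours of every active cell (and again of every neighbour candidate) against the set each cycle, B makes a single pass that tallies each active cube's contribution into a neighbour-count dict and then applies the birth/survival rules straight from the counts.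
-- outside the precondition, e.g. on simulate_cycles({(0, 1, 2), (0, 0)}, 1): A raises IndexError, B returns set(); on simulate_cycles({(0, 0, 0, 1), (0, 0, 1, 0), (0, 0, 0, 0, 0)}, 1): A returns {(0, 0, 0, 0, 0)}, B returns set()
import Mathlib
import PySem

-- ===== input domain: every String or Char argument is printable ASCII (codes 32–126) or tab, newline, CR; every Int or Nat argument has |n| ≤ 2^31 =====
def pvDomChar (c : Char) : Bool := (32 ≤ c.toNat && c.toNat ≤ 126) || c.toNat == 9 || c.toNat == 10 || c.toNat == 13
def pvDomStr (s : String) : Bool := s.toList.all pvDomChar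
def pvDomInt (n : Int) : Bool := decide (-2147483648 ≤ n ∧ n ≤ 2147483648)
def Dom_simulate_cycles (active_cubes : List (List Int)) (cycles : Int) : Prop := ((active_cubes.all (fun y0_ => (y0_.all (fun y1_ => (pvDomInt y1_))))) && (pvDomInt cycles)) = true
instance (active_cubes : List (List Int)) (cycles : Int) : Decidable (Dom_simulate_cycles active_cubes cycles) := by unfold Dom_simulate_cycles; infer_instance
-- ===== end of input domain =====

-- B replaces A's per-cell rescans of all 26/80 neighbours against the set (one scan per active
-- cell and one more per neighbour candidate) by a single pass that counts each active cube's
-- contribution to its neighbours in a dict and applies the rules from the counts.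

-- ===== PORT A =====
def pvLocal3 : List (Int × Int × Int) :=
  (PySem.List.pyRange (-1) 2 1).flatMap (fun dx =>
    (PySem.List.pyRange (-1) 2 1).flatMap (fun dy =>
      ((PySem.List.pyRange (-1) 2 1).filter
        (fun dz => decide (¬(dx = 0 ∧ dy = 0 ∧ dz = 0)))).map (fun dz => (dx, dy, dz))))

def pvLocal4 : List (Int × Int × Int × Int) :=
  (PySem.List.pyRange (-1) 2 1).flatMap (fun dx =>
    (PySem.List.pyRange (-1) 2 1).flatMap (fun dy =>
      (PySem.List.pyRange (-1) 2 1).flatMap (fun dz =>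
        ((PySem.List.pyRange (-1) 2 1).filter
          (fun dw => decide (¬(dx = 0 ∧ dy = 0 ∧ dz = 0 ∧ dw = 0)))).map (fun dw => (dx, dy, dz, dw)))))

-- cube[i]: total form of the subscript; Pre_ keeps every cube long enough for the indices used
def pvGet (cube : List Int) (i : Int) : Int := (PySem.List.pyGet? cube i).getD 0

def get_neighbours (cube : List Int) : List (List Int) :=
  if cube.length = 3 then
    pvLocal3.map (fun d => [pvGet cube 0 + d.1, pvGet cube 1 + d.2.1, pvGet cube 2 + d.2.2])
  else
    pvLocal4.map (fun d =>
      [pvGet cube 0 + d.1, pvGet cube 1 + d.2.1, pvGet cube 2 + d.2.2.1, pvGet cube 3 + d.2.2.2])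

def get_active_neighbours (active_cubes : List (List Int)) (cube : List Int) : List (List Int) :=
  (get_neighbours cube).filter (fun n => decide (n ∈ active_cubes))

-- the body of A's 'for _ in range(1, cycles + 1)' loop
def pvStepA (active : List (List Int)) : List (List Int) :=
  let deactivated := active.foldl (fun s cube =>
    if !((get_active_neighbours active cube).length == 2 ||
         (get_active_neighbours active cube).length == 3) then PySem.Set.add s cube else s)
    PySem.Set.empty
  let all_neighbours := PySem.Set.ofList (active.flatMap (fun cube => get_neighbours cube))
  let activated := all_neighbours.foldl (fun s cube =>
    if (get_active_neighbours active cube).length == 3 then PySem.Set.add s cube else s)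
    PySem.Set.empty
  PySem.Set.union (PySem.Set.diff active deactivated) activated

def simulate_cycles (active_cubes : List (List Int)) (cycles : Int) : List (List Int) :=
  (PySem.List.pyRange 1 (cycles + 1) 1).foldl (fun active _ => pvStepA active) active_cubes

-- ===== PORT B =====
def get_neighbours_alt (cube : List Int) : List (List Int) :=
  if cube.length = 3 ∨ cube.length = 4 then
    let offsets := cube.foldl
      (fun offs _ => offs.flatMap (fun o => [(-1 : Int), 0, 1].map (fun d => o ++ [d]))) [[]]
    (offsets.filter (fun o => o.any (fun d => !(d == 0)))).map
      (fun o => (cube.zip o).map (fun p => p.1 + p.2))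
  else []

-- the body of B's 'for _ in range(cycles)' loop
def pvStepB (active : List (List Int)) : List (List Int) :=
  let counts := active.foldl (fun d cube =>
    (get_neighbours_alt cube).foldl (fun d n => d.modify n 0 (fun x => x + 1)) d)
    (PySem.Dict.empty : PySem.Dict (List Int) Int)
  let survivors := PySem.Set.ofList (active.filter
    (fun c => decide (counts.getD c 0 = 2) || decide (counts.getD c 0 = 3)))
  let births := PySem.Set.ofList (counts.keys.filter
    (fun c => decide (counts.getD c 0 = 3) && !(decide (c ∈ active))))
  PySem.Set.union survivors births

def simulate_cycles_alt (active_cubes : List (List Int)) (cycles : Int) : List (List Int) :=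
  (PySem.List.pyRange 0 cycles 1).foldl (fun active _ => pvStepB active) active_cubes

-- ===== PRECONDITION & SPEC =====
-- Unless the loop never runs (cycles ≤ 0), Pre_ asks every cube to have exactly 3 or 4
-- coordinates (and, the argument being a Python set, to be duplicate-free): on a cube shorter
-- than 3 A raises IndexError; on a cube longer than 4 A returns a value but silently truncates
-- the cube to 4 coordinates when generating its neighbours while still matching the untruncated
-- cube against the set — an accidental asymmetry of A's implementation on malformed input that B
-- does not reproduce.
def Pre_simulate_cycles (active_cubes : List (List Int)) (cycles : Int) : Prop :=
  cycles ≤ 0 ∨ (active_cubes.Nodup ∧ ∀ c ∈ active_cubes, c.length = 3 ∨ c.length = 4)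
instance (active_cubes : List (List Int)) (cycles : Int) : Decidable (Pre_simulate_cycles active_cubes cycles) := by unfold Pre_simulate_cycles; infer_instance

def pvWitness_simulate_cycles : List (List Int) × Int := ([[0, 0, 0], [0, 1, 0], [0, 2, 0]], 1)

def Spec_simulate_cycles (active_cubes : List (List Int)) (cycles : Int) (out : List (List Int)) : Prop := out = simulate_cycles_alt active_cubes cycles
instance (active_cubes : List (List Int)) (cycles : Int) (out : List (List Int)) : Decidable (Spec_simulate_cycles active_cubes cycles out) := by unfold Spec_simulate_cycles; infer_instance

-- ===== CLAIM (what is proved, stated in full; the proofs are below) =====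
def Claim_equal_simulate_cycles : Prop := ∀ (active_cubes : List (List Int)) (cycles : Int), Dom_simulate_cycles active_cubes cycles → Pre_simulate_cycles active_cubes cycles → Spec_simulate_cycles active_cubes cycles (simulate_cycles active_cubes cycles)

-- ===== LEMMAS AND PROOFS =====

-- the loop invariant: a duplicate-free list of 3- or 4-coordinate cubes
def pvInv (active : List (List Int)) : Prop :=
  active.Nodup ∧ ∀ c ∈ active, c.length = 3 ∨ c.length = 4

theorem pv_foldl_const {α β : Type} (f : α → α) (l : List β) (a : α) :
    l.foldl (fun x _ => f x) a = f^[l.length] a := by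
  induction l generalizing a with
  | nil => rfl
  | cons x t ih => simp [List.foldl_cons, ih, Function.iterate_succ_apply]

theorem pv_nbrs_alt_eq (c : List Int) (h : c.length = 3 ∨ c.length = 4) :
    get_neighbours_alt c = get_neighbours c := by
  match c, h with
  | [x, y, z], _ => rfl
  | [x, y, z, w], _ => rfl

theorem pv_N3_eq (a b g : Int) : get_neighbours [a, b, g]
    = pvLocal3.map (fun d => [a + d.1, b + d.2.1, g + d.2.2]) := rfl

theorem pv_N4_eq (a b g e : Int) : get_neighbours [a, b, g, e]
    = pvLocal4.map (fun d => [a + d.1, b + d.2.1, g + d.2.2.1, e + d.2.2.2]) := rfl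

theorem pv_mem_local3 (d : Int × Int × Int) :
    d ∈ pvLocal3 ↔ ((-1 ≤ d.1 ∧ d.1 ≤ 1) ∧ (-1 ≤ d.2.1 ∧ d.2.1 ≤ 1) ∧ (-1 ≤ d.2.2 ∧ d.2.2 ≤ 1))
      ∧ ¬(d.1 = 0 ∧ d.2.1 = 0 ∧ d.2.2 = 0) := by
  obtain ⟨a, b, c⟩ := d
  simp [pvLocal3, List.mem_flatMap, List.mem_map, List.mem_filter,
    PySem.List.mem_pyRange_one, Prod.mk.injEq]
  omega

theorem pv_mem_local4 (d : Int × Int × Int × Int) :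
    d ∈ pvLocal4 ↔ ((-1 ≤ d.1 ∧ d.1 ≤ 1) ∧ (-1 ≤ d.2.1 ∧ d.2.1 ≤ 1) ∧ (-1 ≤ d.2.2.1 ∧ d.2.2.1 ≤ 1)
      ∧ (-1 ≤ d.2.2.2 ∧ d.2.2.2 ≤ 1)) ∧ ¬(d.1 = 0 ∧ d.2.1 = 0 ∧ d.2.2.1 = 0 ∧ d.2.2.2 = 0) := by
  obtain ⟨a, b, c, e⟩ := d
  simp [pvLocal4, List.mem_flatMap, List.mem_map, List.mem_filter,
    PySem.List.mem_pyRange_one, Prod.mk.injEq]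
  omega

theorem pv_len_mem_N {x w : List Int} (_hx : x.length = 3 ∨ x.length = 4)
    (h : w ∈ get_neighbours x) : w.length = 3 ∨ w.length = 4 := by
  unfold get_neighbours at h
  split at h <;> rw [List.mem_map] at h <;> obtain ⟨d, -, rfl⟩ := h <;> simp

theorem pv_N_symm {c x : List Int} (hc : c.length = 3 ∨ c.length = 4)
    (hx : x.length = 3 ∨ x.length = 4) : (c ∈ get_neighbours x ↔ x ∈ get_neighbours c) := by
  match c, hc, x, hx with
  | [a,b,g], _, [p,q,r], _ =>
      simp only [pv_N3_eq, List.mem_map]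
      constructor
      · rintro ⟨d, hmem, heq⟩
        rw [pv_mem_local3] at hmem
        simp only [List.cons.injEq, and_true] at heq
        refine ⟨(p - a, q - b, r - g), ?_, ?_⟩
        · rw [pv_mem_local3]; simp; omega
        · simp only [List.cons.injEq, and_true]; omega
      · rintro ⟨d, hmem, heq⟩
        rw [pv_mem_local3] at hmem
        simp only [List.cons.injEq, and_true] at heq
        refine ⟨(a - p, b - q, g - r), ?_, ?_⟩
        · rw [pv_mem_local3]; simp; omega
        · simp only [List.cons.injEq, and_true]; omega
  | [a,b,g], _, [p,q,r,s], _ =>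
      simp [pv_N3_eq, pv_N4_eq, List.mem_map]
  | [a,b,g,e], _, [p,q,r], _ =>
      simp [pv_N3_eq, pv_N4_eq, List.mem_map]
  | [a,b,g,e], _, [p,q,r,s], _ =>
      simp only [pv_N4_eq, List.mem_map]
      constructor
      · rintro ⟨d, hmem, heq⟩
        rw [pv_mem_local4] at hmem
        simp only [List.cons.injEq, and_true] at heq
        refine ⟨(p - a, q - b, r - g, s - e), ?_, ?_⟩
        · rw [pv_mem_local4]; simp; omega
        · simp only [List.cons.injEq, and_true]; omega
      · rintro ⟨d, hmem, heq⟩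
        rw [pv_mem_local4] at hmem
        simp only [List.cons.injEq, and_true] at heq
        refine ⟨(a - p, b - q, g - r, e - s), ?_, ?_⟩
        · rw [pv_mem_local4]; simp; omega
        · simp only [List.cons.injEq, and_true]; omega

theorem pv_nodup_N (c : List Int) : (get_neighbours c).Nodup := by
  unfold get_neighbours
  split
  · refine List.Nodup.map ?_ (by decide)
    rintro ⟨dx, dy, dz⟩ ⟨ex, ey, ez⟩ h
    simp only [List.cons.injEq, and_true, Prod.mk.injEq] at h ⊢
    omega
  · refine List.Nodup.map ?_ (by decide)
    rintro ⟨dx, dy, dz, dw⟩ ⟨ex, ey, ez, ew⟩ h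
    simp only [List.cons.injEq, and_true, Prod.mk.injEq] at h ⊢
    omega

theorem pv_count_N (w c : List Int) :
    (get_neighbours c).count w = if w ∈ get_neighbours c then 1 else 0 := by
  split <;> rename_i h
  · exact List.count_eq_one_of_mem (pv_nodup_N c) h
  · exact List.count_eq_zero_of_not_mem h

theorem pv_countP_mem_comm {α : Type} (p q : α → Bool) (l₁ l₂ : List α)
    (hp : ∀ a, p a = true ↔ a ∈ l₂) (hq : ∀ a, q a = true ↔ a ∈ l₁)
    (h₁ : l₁.Nodup) (h₂ : l₂.Nodup) : l₁.countP p = l₂.countP q := by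
  rw [List.countP_eq_length_filter, List.countP_eq_length_filter]
  apply List.Perm.length_eq
  rw [List.perm_ext_iff_of_nodup (List.Nodup.filter _ h₁) (List.Nodup.filter _ h₂)]
  intro a
  simp only [List.mem_filter, hp, hq]
  tauto

theorem pv_sum_count_eq_countP (c : List Int) (l : List (List Int)) :
    (l.map (fun x => (get_neighbours x).count c)).sum
      = l.countP (fun x => decide (c ∈ get_neighbours x)) := by
  induction l with
  | nil => rfl
  | cons x t ih =>
      simp only [List.map_cons, List.sum_cons, List.countP_cons]
      rw [ih, pv_count_N]
      by_cases h : c ∈ get_neighbours x <;> simp [h, Nat.add_comm]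

-- the central count identity: B's neighbour-contribution count of a cube equals the length of
-- A's list of that cube's active neighbours
theorem pv_cnt_eq {active : List (List Int)} (hinv : pvInv active) {c : List Int}
    (hc : c.length = 3 ∨ c.length = 4) :
    (active.flatMap (fun x => get_neighbours x)).count c
      = (get_active_neighbours active c).length := by
  rw [List.count_flatMap]
  have h1 : (List.map (List.count c ∘ fun x => get_neighbours x) active).sum
      = active.countP (fun x => decide (c ∈ get_neighbours x)) := pv_sum_count_eq_countP c active
  rw [h1]
  have h2 : active.countP (fun x => decide (c ∈ get_neighbours x))
      = active.countP (fun x => decide (x ∈ get_neighbours c)) := by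
    apply List.countP_congr
    intro x hxmem
    simp only [decide_eq_true_eq]
    exact pv_N_symm hc (hinv.2 x hxmem)
  rw [h2]
  rw [pv_countP_mem_comm (fun x => decide (x ∈ get_neighbours c))
    (fun n => decide (n ∈ active)) active (get_neighbours c)
    (fun a => by simp) (fun a => by simp) hinv.1 (pv_nodup_N c),
    List.countP_eq_length_filter]
  rfl

theorem pv_foldl_add_if {α : Type} [BEq α] [LawfulBEq α] (p : α → Bool)
    (l : List α) (s : List α) (hnd : (s ++ l).Nodup) :
    l.foldl (fun s x => if p x then PySem.Set.add s x else s) s = s ++ l.filter p := by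
  induction l generalizing s with
  | nil => simp
  | cons x t ih =>
      have h' := hnd
      rw [List.nodup_append] at h'
      have hxns : x ∉ s := fun hm => h'.2.2 x hm x (by simp) rfl
      rw [List.foldl_cons]
      by_cases hp : p x = true
      · rw [if_pos hp, PySem.Set.add_of_not_mem hxns,
          ih (s ++ [x]) (by rwa [← List.append_cons]), List.filter_cons_of_pos hp]
        simp
      · rw [if_neg hp, ih s ((List.sublist_cons_self x t).append_left s |>.nodup hnd),
          List.filter_cons_of_neg hp]

theorem pv_foldl_nested_modify {κ : Type} [BEq κ] (f : List Int → List κ)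
    (l : List (List Int)) (d0 : PySem.Dict κ Int) :
    l.foldl (fun d cube => (f cube).foldl
        (fun d n => d.modify n 0 (fun x => x + 1)) d) d0
      = (l.flatMap (fun cube => f cube)).foldl
        (fun d n => d.modify n 0 (fun x => x + 1)) d0 := by
  induction l generalizing d0 with
  | nil => rfl
  | cons x t ih => simp [List.flatMap_cons, List.foldl_append, ih]

theorem pv_flatMap_alt_eq {active : List (List Int)}
    (hlen : ∀ c ∈ active, c.length = 3 ∨ c.length = 4) :
    active.flatMap (fun cube => get_neighbours_alt cube)
      = active.flatMap (fun cube => get_neighbours cube) := by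
  induction active with
  | nil => rfl
  | cons x t ih =>
      simp only [List.flatMap_cons]
      rw [pv_nbrs_alt_eq x (hlen x (by simp)), ih (fun c hc => hlen c (by simp [hc]))]

theorem pv_step_eq {active : List (List Int)} (hinv : pvInv active) :
    pvStepA active = pvStepB active := by
  obtain ⟨hnd, hlen⟩ := hinv
  unfold pvStepA pvStepB
  dsimp only
  -- B's counter, rewritten to a counter over A's flat neighbour list
  simp only [pv_foldl_nested_modify, pv_flatMap_alt_eq hlen]
  set allN := active.flatMap (fun cube => get_neighbours cube) with hallN
  set counts := allN.foldl (fun d n => d.modify n 0 (fun x => x + 1))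
    (PySem.Dict.empty : PySem.Dict (List Int) Int) with hcounts
  have hgetD : ∀ c, counts.getD c 0 = (allN.count c : Int) := by
    intro c
    rw [hcounts, PySem.Dict.getD_foldl_modify_add_one, PySem.Dict.getD_empty, zero_add]
  have hcnt : ∀ c, c.length = 3 ∨ c.length = 4 →
      counts.getD c 0 = ((get_active_neighbours active c).length : Int) := by
    intro c hc
    rw [hgetD, hallN, pv_cnt_eq ⟨hnd, hlen⟩ hc]
  have hkeys : counts.keys = PySem.Set.ofList allN := by
    rw [hcounts, PySem.Dict.keys_foldl_modify, PySem.Dict.keys_empty,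
      PySem.Set.update_nil_left]
  -- deactivated as a filter
  rw [pv_foldl_add_if (fun cube => !((get_active_neighbours active cube).length == 2 ||
    (get_active_neighbours active cube).length == 3)) active PySem.Set.empty
    (by simpa using hnd)]
  simp only [PySem.Set.empty, List.nil_append]
  -- the common survivor list
  have hdiff : PySem.Set.diff active (active.filter (fun cube =>
      !((get_active_neighbours active cube).length == 2 ||
        (get_active_neighbours active cube).length == 3)))
      = active.filter (fun c => decide (counts.getD c 0 = 2) || decide (counts.getD c 0 = 3)) := by
    show active.filter _ = _
    apply List.filter_congr
    intro c hc
    have hcc := hcnt c (hlen c hc)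
    have hmemf : (List.filter (fun cube =>
        !((get_active_neighbours active cube).length == 2 ||
          (get_active_neighbours active cube).length == 3)) active).contains c
        = !((get_active_neighbours active c).length == 2 ||
            (get_active_neighbours active c).length == 3) := by
      by_cases h : ((get_active_neighbours active c).length == 2 ||
          (get_active_neighbours active c).length == 3) = true
      · simp only [h, Bool.not_true]
        rw [Bool.eq_false_iff]
        intro hcon
        rw [List.contains_iff_mem, List.mem_filter, h] at hcon
        simp at hcon
      · simp only [Bool.not_eq_true] at h
        simp only [h, Bool.not_false]
        rw [List.contains_iff_mem, List.mem_filter]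
        exact ⟨hc, by simp [h]⟩
    rw [PySem.Set.contains_eq_listContains, hmemf, Bool.not_not]
    have : ((get_active_neighbours active c).length == 2 ||
        (get_active_neighbours active c).length == 3)
        = (decide (counts.getD c 0 = 2) || decide (counts.getD c 0 = 3)) := by
      rw [hcc]
      rw [Bool.eq_iff_iff]
      simp only [Bool.or_eq_true, beq_iff_eq, decide_eq_true_eq]
      omega
    exact this
  -- activated as a filter
  rw [pv_foldl_add_if (fun cube => (get_active_neighbours active cube).length == 3)
    (PySem.Set.ofList allN) ([] : List (List Int))
    (by simp [PySem.Set.nodup_ofList])]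
  simp only [List.nil_append]
  rw [hdiff, hkeys]
  set surv := active.filter (fun c => decide (counts.getD c 0 = 2) ||
    decide (counts.getD c 0 = 3)) with hsurv
  have hsurvnd : surv.Nodup := hnd.filter _
  have hbnd : ((PySem.Set.ofList allN).filter (fun c =>
      decide (counts.getD c 0 = 3) && !decide (c ∈ active))).Nodup :=
    (PySem.Set.nodup_ofList allN).filter _
  have hand : ((PySem.Set.ofList allN).filter (fun cube =>
      (get_active_neighbours active cube).length == 3)).Nodup :=
    (PySem.Set.nodup_ofList allN).filter _
  show PySem.Set.union surv _ = PySem.Set.union (PySem.Set.ofList surv) _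
  rw [PySem.Set.ofList_eq_self_of_nodup surv hsurvnd,
    PySem.Set.ofList_eq_self_of_nodup _ hbnd]
  show PySem.Set.update surv _ = PySem.Set.update surv _
  rw [PySem.Set.update_eq_append_filter, PySem.Set.update_eq_append_filter,
    PySem.Set.ofList_eq_self_of_nodup _ hand, PySem.Set.ofList_eq_self_of_nodup _ hbnd,
    List.filter_filter, List.filter_filter]
  congr 1
  apply List.filter_congr
  intro c hcall
  have hclen : c.length = 3 ∨ c.length = 4 := by
    rw [PySem.Set.mem_ofList, List.mem_flatMap] at hcall
    obtain ⟨x, hx, hcx⟩ := hcall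
    exact pv_len_mem_N (hlen x hx) hcx
  have hcc := hcnt c hclen
  have h3iff : ((get_active_neighbours active c).length == 3) = decide (counts.getD c 0 = 3) := by
    rw [hcc]
    rw [Bool.eq_iff_iff]
    simp only [beq_iff_eq, decide_eq_true_eq]
    omega
  rw [h3iff]
  by_cases h3 : decide (counts.getD c 0 = 3) = true
  · simp only [h3, Bool.and_true, Bool.true_and]
    by_cases hact : c ∈ active
    · have hcs : c ∈ surv := by
        rw [hsurv, List.mem_filter]
        exact ⟨hact, by simp [h3]⟩
      simp [hact, hcs]
    · simp [hact]
  · simp only [Bool.not_eq_true] at h3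
    simp [h3]

theorem pv_inv_step {active : List (List Int)} (hinv : pvInv active) :
    pvInv (pvStepB active) := by
  obtain ⟨hnd, hlen⟩ := hinv
  unfold pvStepB
  constructor
  · exact PySem.Set.nodup_union _ _ (PySem.Set.nodup_ofList _)
  · intro c hc
    rw [PySem.Set.mem_union, PySem.Set.mem_ofList, PySem.Set.mem_ofList] at hc
    rcases hc with hc | hc
    · rw [List.mem_filter] at hc
      exact hlen c hc.1
    · rw [List.mem_filter] at hc
      have hck := hc.1
      rw [pv_foldl_nested_modify, pv_flatMap_alt_eq hlen, PySem.Dict.keys_foldl_modify,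
        PySem.Dict.keys_empty, PySem.Set.update_nil_left, PySem.Set.mem_ofList,
        List.mem_flatMap] at hck
      obtain ⟨x, hx, hcx⟩ := hck
      exact pv_len_mem_N (hlen x hx) hcx

-- ===== VERDICT (by name: the statement is the Claim_ definition above) =====
theorem simulate_cycles_spec : Claim_equal_simulate_cycles := by
  intro active cycles hdom hpre
  clear hdom
  unfold Spec_simulate_cycles simulate_cycles simulate_cycles_alt
  rcases hpre with hneg | hpre'
  · rw [PySem.List.pyRange_one_eq_nil (by omega), PySem.List.pyRange_one_eq_nil (by omega)]
    rfl
  · rw [pv_foldl_const pvStepA, pv_foldl_const pvStepB,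
      PySem.List.length_pyRange_one, PySem.List.length_pyRange_one]
    have hlen : (cycles + 1 - 1).toNat = (cycles - 0).toNat := by omega
    rw [hlen]
    generalize (cycles - 0).toNat = n
    induction n generalizing active with
    | zero => rfl
    | succ m ih =>
        rw [Function.iterate_succ_apply, Function.iterate_succ_apply, pv_step_eq hpre']
        exact ih (pvStepB active) (pv_inv_step hpre')
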